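-- pv_equiv track=rewrite | github.com/thom7e/Python | AOC/2021/day-10.py | check_incomplete
-- ===== SOURCE A (Python) =====
-- open = ["[","<","(","{"]
--
-- def replace(linez):
--     combs = ["[]", "<>", "()", "{}"]
--     for comb in combs:
--         linez = linez.replace(comb, "")
--     return linez
--
-- def rekursion(line):
--     new_line = replace(line)
--     if len(replace(line)) == len(line):
--         return replace(line)
--     else:
--         return rekursion(new_line)
--
-- def check_incomplete(line):
--     checker = []
--     for x in rekursion(line):
--         if x not in open:
--             checker.append("x")
--         else:
--             checker.append("y")
--     if len(set(checker)) == 2: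
--         return ""
--     else:
--         return str(line)
-- ===== SOURCE B (Python) =====
-- _PAIRS = (("[", "]"), ("<", ">"), ("(", ")"), ("{", "}"))
-- _OPEN = "[<({"
--
-- def check_incomplete(line):
--     stack = []
--     for c in line:
--         if stack and (stack[-1], c) in _PAIRS:
--             stack.pop()
--         else:
--             stack.append(c)
--     has_open = any(c in _OPEN for c in stack)
--     has_other = any(c not in _OPEN for c in stack)
--     return "" if has_open and has_other else line
-- ===== Notes on version B (the rewrite author's own statement) =====
-- stated objective: alternative
-- what changed: A repeatedly rescans the whole string with four str.replace passes until a fixed point and then classifies via a set of tags; B cancels matched bracket pairs in one left-to-right pass with an explicit stack and classifies the residual stack directly.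
import Mathlib
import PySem

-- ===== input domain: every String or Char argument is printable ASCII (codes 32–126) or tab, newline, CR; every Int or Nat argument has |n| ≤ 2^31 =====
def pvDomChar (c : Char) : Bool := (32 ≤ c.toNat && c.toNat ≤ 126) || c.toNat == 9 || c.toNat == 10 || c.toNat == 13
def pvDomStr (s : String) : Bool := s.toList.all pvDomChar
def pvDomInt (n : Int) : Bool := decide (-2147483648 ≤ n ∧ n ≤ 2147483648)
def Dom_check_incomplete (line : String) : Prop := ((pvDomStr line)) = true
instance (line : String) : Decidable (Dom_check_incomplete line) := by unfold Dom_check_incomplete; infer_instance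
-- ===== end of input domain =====

-- B replaces A's repeated whole-string replace passes by a one-pass stack reduction.

-- ===== PORT A =====
-- A's module constant `open`, a list of 1-char strings; iterating a str yields its chars,
-- so `x in open` on them is exactly Char membership in this list.
def pyOpen : List Char := ['[', '<', '(', '{']

-- def replace(linez): for comb in combs: linez = linez.replace(comb, "")
def replaceA (linez : String) : String :=
  (["[]", "<>", "()", "{}"] : List String).foldl (fun l comb => PySem.Str.replace l comb "") linez

-- the next two lemmas exist only because rekursionA's termination (decreasing_by) cites replaceA_len_le
theorem go_len_le (old acc : List Char) : ∀ (fuel : Nat) (l : List Char),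
    (PySem.Chars.replace.go old [] fuel l acc).length ≤ acc.length + l.length := by
  intro fuel
  induction fuel generalizing acc with
  | zero => intro l; rw [PySem.Chars.replace.go]; simp
  | succ n ih =>
    intro l
    cases l with
    | nil => rw [PySem.Chars.replace.go]; simp; omega
    | cons c t =>
      rw [PySem.Chars.replace.go]
      split
      · have := ih (List.reverse [] ++ acc) (List.drop old.length (c :: t))
        simp at this ⊢
        omega
      · have := ih (c :: acc) t
        simp at this ⊢
        omega

theorem replace_len_le (s comb : String) :
    (PySem.Str.replace s comb "").toList.length ≤ s.toList.length := by
  rw [PySem.Str.toList_replace]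
  unfold PySem.Chars.replace
  split
  · simp_all
  · simpa using go_len_le comb.toList [] s.toList.length s.toList

theorem replaceA_len_le (s : String) : (replaceA s).toList.length ≤ s.toList.length := by
  unfold replaceA
  simp only [List.foldl_cons, List.foldl_nil]
  exact le_trans (replace_len_le _ _) (le_trans (replace_len_le _ _)
    (le_trans (replace_len_le _ _) (replace_len_le _ _)))

-- def rekursion(line): …  (terminates: a pass that changes the length strictly shrinks the string)
def rekursionA (line : String) : String :=
  let new_line := replaceA line
  if PySem.Str.len (replaceA line) = PySem.Str.len line then replaceA line
  else rekursionA new_line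
termination_by line.toList.length
decreasing_by
  simp only [PySem.Str.len_eq] at *
  have h := replaceA_len_le line
  omega

def check_incomplete (line : String) : String :=
  let checker : List String :=
    (rekursionA line).toList.foldl
      (fun acc x => if x ∉ pyOpen then acc ++ ["x"] else acc ++ ["y"]) []
  if PySem.Set.len (PySem.Set.ofList checker) = 2 then "" else line

-- ===== PORT B =====
-- `(stack[-1], c) in _PAIRS`
def isPairB (o c : Char) : Bool :=
  decide ((o, c) ∈ [('[', ']'), ('<', '>'), ('(', ')'), ('{', '}')])

-- one iteration of B's loop: stack with its top at the END (Python append/pop)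
def stepB (st : List Char) (c : Char) : List Char :=
  match st.getLast? with
  | some t => if isPairB t c then st.dropLast else st ++ [c]
  | none => st ++ [c]

-- `c in _OPEN` on a 1-char string c is Char membership in _OPEN's chars
def openB : List Char := "[<({".toList

def check_incomplete_alt (line : String) : String :=
  let stack := line.toList.foldl stepB []
  let has_open := stack.any (fun c => c ∈ openB)
  let has_other := stack.any (fun c => c ∉ openB)
  if has_open && has_other then "" else line

-- ===== PRECONDITION & SPEC =====
def Spec_check_incomplete (line : String) (out : String) : Prop := out = check_incomplete_alt line
instance (line : String) (out : String) : Decidable (Spec_check_incomplete line out) := by unfold Spec_check_incomplete; infer_instance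

-- ===== CLAIM (what is proved, stated in full; the proofs are below) =====
def Claim_equal_check_incomplete : Prop := ∀ (line : String), Dom_check_incomplete line → Spec_check_incomplete line (check_incomplete line)

-- ===== LEMMAS AND PROOFS =====

theorem isPairB_opener (t a : Char) (ha : a ∈ pyOpen) : isPairB t a = false := by
  fin_cases ha <;> simp [isPairB]

theorem stepB_push (st : List Char) (a : Char) (ha : a ∈ pyOpen) : stepB st a = st ++ [a] := by
  unfold stepB
  cases h : st.getLast? with
  | none => rfl
  | some t => simp [isPairB_opener t a ha]

theorem isPairB_mem (a b : Char) (h : isPairB a b = true) : a ∈ pyOpen := by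
  simp [isPairB] at h
  rcases h with ⟨h1, h2⟩ | ⟨h1, h2⟩ | ⟨h1, h2⟩ | ⟨h1, h2⟩ <;> subst h1 <;> decide

theorem stepB_cancel (st : List Char) (a b : Char) (h : isPairB a b = true) :
    stepB (stepB st a) b = st := by
  rw [stepB_push st a (isPairB_mem a b h)]
  unfold stepB
  simp [h]

-- the stack fold is invariant under one replace pass that deletes a matched pair
theorem go_fold (a b : Char) (h : isPairB a b = true) :
    ∀ (fuel : Nat) (l acc st : List Char), l.length ≤ fuel →
    List.foldl stepB st (PySem.Chars.replace.go [a, b] [] fuel l acc) =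
      List.foldl stepB st (acc.reverse ++ l) := by
  intro fuel
  induction fuel with
  | zero =>
    intro l acc st hl
    have : l = [] := by cases l <;> simp_all
    subst this
    rw [PySem.Chars.replace.go]
  | succ n ih =>
    intro l acc st hl
    cases l with
    | nil => rw [PySem.Chars.replace.go]; simp; omega
    | cons c t =>
      rw [PySem.Chars.replace.go]
      split
      · rename_i hp
        rw [List.isPrefixOf_iff_prefix] at hp
        obtain ⟨u, hu⟩ := hp
        simp at hu
        obtain ⟨rfl, rfl⟩ := hu
        simp only [List.length_cons, List.drop_succ_cons, List.drop, List.length_nil]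
        rw [ih u ([].reverse ++ acc) st (by simp at hl ⊢; omega)]
        simp only [List.reverse_nil, List.nil_append]
        rw [List.foldl_append, List.foldl_append, List.foldl_cons, List.foldl_cons,
            stepB_cancel _ a b h]
      · rw [ih t (c :: acc) st (by simp at hl ⊢; omega)]
        simp

-- a pass that removes nothing is the identity, and then the pattern does not occur
theorem go_nf (a b : Char) : ∀ (fuel : Nat) (l acc : List Char), l.length ≤ fuel →
    (PySem.Chars.replace.go [a, b] [] fuel l acc).length = acc.length + l.length →
    PySem.Chars.replace.go [a, b] [] fuel l acc = acc.reverse ++ l ∧ ¬ [a, b] <:+: l := by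
  intro fuel
  induction fuel with
  | zero =>
    intro l acc hl _
    have : l = [] := by cases l <;> simp_all
    subst this
    rw [PySem.Chars.replace.go]
    simp
  | succ n ih =>
    intro l acc hl hlen
    cases l with
    | nil => rw [PySem.Chars.replace.go]; simp; omega
    | cons c t =>
      rw [PySem.Chars.replace.go] at hlen ⊢
      split at hlen
      · rename_i hp
        rw [List.isPrefixOf_iff_prefix] at hp
        obtain ⟨u, hu⟩ := hp
        simp at hu
        obtain ⟨rfl, rfl⟩ := hu
        exfalso
        have hle := go_len_le [a, b] ([].reverse ++ acc) n (List.drop [a, b].length (a :: b :: u))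
        simp at hle hlen
        omega
      · rename_i hp
        have hlen' : (PySem.Chars.replace.go [a, b] [] n t (c :: acc)).length =
            (c :: acc).length + t.length := by
          simp at hlen ⊢; omega
        obtain ⟨heq, hinf⟩ := ih t (c :: acc) (by simp at hl ⊢; omega) hlen'
        simp only [hp]
        constructor
        · rw [heq]; simp
        · rw [List.infix_cons_iff]
          rintro (hpre | hinf')
          · exact hp (List.isPrefixOf_iff_prefix.mpr hpre)
          · exact hinf hinf'

theorem replaceC_len_le (a b : Char) (s : List Char) :
    (PySem.Chars.replace s [a, b] []).length ≤ s.length := by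
  unfold PySem.Chars.replace
  split
  · simp_all
  · simpa using go_len_le [a, b] [] s.length s

theorem replaceC_fold (a b : Char) (h : isPairB a b = true) (s st : List Char) :
    List.foldl stepB st (PySem.Chars.replace s [a, b] []) = List.foldl stepB st s := by
  unfold PySem.Chars.replace
  split
  · simp_all
  · rw [go_fold a b h s.length s [] st le_rfl]
    simp

theorem replaceC_nf (a b : Char) (s : List Char)
    (h : (PySem.Chars.replace s [a, b] []).length = s.length) :
    PySem.Chars.replace s [a, b] [] = s ∧ ¬ [a, b] <:+: s := by
  unfold PySem.Chars.replace at h ⊢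
  split at h
  · simp_all
  · have := go_nf a b s.length s [] le_rfl (by simpa using h)
    simpa using this

theorem toList_c1 : ("[]" : String).toList = ['[', ']'] := by decide
theorem toList_c2 : ("<>" : String).toList = ['<', '>'] := by decide
theorem toList_c3 : ("()" : String).toList = ['(', ')'] := by decide
theorem toList_c4 : ("{}" : String).toList = ['{', '}'] := by decide

theorem replaceA_toList (s : String) :
    (replaceA s).toList =
      PySem.Chars.replace (PySem.Chars.replace (PySem.Chars.replace
        (PySem.Chars.replace s.toList ['[', ']'] []) ['<', '>'] []) ['(', ')'] []) ['{', '}'] [] := by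
  unfold replaceA
  simp only [List.foldl_cons, List.foldl_nil, PySem.Str.toList_replace,
    toList_c1, toList_c2, toList_c3, toList_c4]
  rfl

theorem replaceA_fold (s : String) (st : List Char) :
    List.foldl stepB st (replaceA s).toList = List.foldl stepB st s.toList := by
  rw [replaceA_toList,
    replaceC_fold '{' '}' (by decide), replaceC_fold '(' ')' (by decide),
    replaceC_fold '<' '>' (by decide), replaceC_fold '[' ']' (by decide)]

theorem isPairB_cases (a b : Char) (h : isPairB a b = true) :
    (a = '[' ∧ b = ']') ∨ (a = '<' ∧ b = '>') ∨ (a = '(' ∧ b = ')') ∨ (a = '{' ∧ b = '}') := by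
  simpa [isPairB, Prod.ext_iff] using h

theorem replaceA_nf (s : String) (h : (replaceA s).toList.length = s.toList.length) :
    (replaceA s).toList = s.toList ∧
      ∀ a b, isPairB a b = true → ¬ [a, b] <:+: s.toList := by
  rw [replaceA_toList] at h ⊢
  have l1 := replaceC_len_le '[' ']' s.toList
  have l2 := replaceC_len_le '<' '>' (PySem.Chars.replace s.toList ['[', ']'] [])
  have l3 := replaceC_len_le '(' ')' (PySem.Chars.replace (PySem.Chars.replace s.toList ['[', ']'] []) ['<', '>'] [])
  have l4 := replaceC_len_le '{' '}' (PySem.Chars.replace (PySem.Chars.replace (PySem.Chars.replace s.toList ['[', ']'] []) ['<', '>'] []) ['(', ')'] [])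
  obtain ⟨q1, n1⟩ := replaceC_nf '[' ']' s.toList (by omega)
  rw [q1] at h ⊢
  have l2' := replaceC_len_le '<' '>' s.toList
  have l3' := replaceC_len_le '(' ')' (PySem.Chars.replace s.toList ['<', '>'] [])
  have l4' := replaceC_len_le '{' '}' (PySem.Chars.replace (PySem.Chars.replace s.toList ['<', '>'] []) ['(', ')'] [])
  obtain ⟨q2, n2⟩ := replaceC_nf '<' '>' s.toList (by omega)
  rw [q2] at h ⊢
  have l3'' := replaceC_len_le '(' ')' s.toList
  have l4'' := replaceC_len_le '{' '}' (PySem.Chars.replace s.toList ['(', ')'] [])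
  obtain ⟨q3, n3⟩ := replaceC_nf '(' ')' s.toList (by omega)
  rw [q3] at h ⊢
  obtain ⟨q4, n4⟩ := replaceC_nf '{' '}' s.toList h
  refine ⟨q4, ?_⟩
  intro a b hab
  rcases isPairB_cases a b hab with ⟨rfl, rfl⟩ | ⟨rfl, rfl⟩ | ⟨rfl, rfl⟩ | ⟨rfl, rfl⟩
  · exact n1
  · exact n2
  · exact n3
  · exact n4

theorem rekursionA_fold (f : List Char → List Char)
    (hrepl : ∀ s : String, f (replaceA s).toList = f s.toList) :
    ∀ s : String, f (rekursionA s).toList = f s.toList := by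
  intro s
  induction s using rekursionA.induct with
  | case1 s hif =>
    rw [rekursionA.eq_def]
    simp only [hif, if_pos]
    exact hrepl s
  | case2 s _nl hif ih =>
    rw [rekursionA.eq_def]
    simp only [if_neg hif]
    rw [ih]
    exact hrepl s

theorem rekursionA_nf : ∀ (s : String) (a b : Char), isPairB a b = true →
    ¬ [a, b] <:+: (rekursionA s).toList := by
  intro s
  induction s using rekursionA.induct with
  | case1 s hif =>
    rw [rekursionA.eq_def]
    simp only [hif, if_pos]
    have h' := hif
    rw [PySem.Str.len_eq, PySem.Str.len_eq] at h'
    have hlen : (replaceA s).toList.length = s.toList.length := by exact_mod_cast h'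
    obtain ⟨heq, hnf⟩ := replaceA_nf s hlen
    rw [heq]
    exact hnf
  | case2 s _nl hif ih =>
    rw [rekursionA.eq_def]
    simp only [if_neg hif]
    exact ih

-- pair-free strings are chains without adjacent redexes …
theorem nf_chain (l : List Char) (h : ∀ a b, isPairB a b = true → ¬ [a, b] <:+: l) :
    List.IsChain (fun a b => isPairB a b = false) l := by
  induction l with
  | nil => exact List.isChain_nil
  | cons c t ih =>
    cases t with
    | nil => exact List.isChain_singleton _
    | cons d u =>
      rw [List.isChain_cons_cons]
      constructor
      · by_contra hcd
        rw [Bool.not_eq_false] at hcd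
        exact h c d hcd ⟨[], u, rfl⟩
      · exact ih (fun a b hab hinf => h a b hab (hinf.trans (List.suffix_cons c (d :: u)).isInfix))

-- … and the stack fold fixes them
theorem chain_fold (l : List Char) (hc : List.IsChain (fun a b => isPairB a b = false) l) :
    ∀ st, (∀ t c, st.getLast? = some t → l.head? = some c → isPairB t c = false) →
    List.foldl stepB st l = st ++ l := by
  induction l with
  | nil => intro st _; simp
  | cons c t ih =>
    intro st hcompat
    have hstep : stepB st c = st ++ [c] := by
      unfold stepB
      cases hg : st.getLast? with
      | none => rfl
      | some x => simp only []; rw [hcompat x c hg rfl]; simp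
    rw [List.foldl_cons, hstep]
    rw [ih (List.IsChain.tail hc) (st ++ [c]) ?_]
    · simp
    · intro x y hx hy
      simp at hx
      subst hx
      cases t with
      | nil => simp at hy
      | cons d u =>
        simp at hy
        subst hy
        exact (List.isChain_cons_cons.mp hc).1

-- B's stack equals A's residual string
theorem stack_eq_residual (line : String) :
    line.toList.foldl stepB [] = (rekursionA line).toList := by
  have h1 := rekursionA_fold (fun l => List.foldl stepB [] l) (fun s => replaceA_fold s []) line
  have h2 := chain_fold (rekursionA line).toList
    (nf_chain _ (rekursionA_nf line)) [] (by intro t c h _; simp at h)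
  simp only [List.nil_append] at h2
  simp only [] at h1
  rw [← h1, h2]

-- A's checker list is a map
theorem checker_map (l : List Char) (acc : List String) :
    l.foldl (fun acc x => if x ∉ pyOpen then acc ++ ["x"] else acc ++ ["y"]) acc =
      acc ++ l.map (fun x => if x ∉ pyOpen then "x" else "y") := by
  induction l generalizing acc with
  | nil => simp
  | cons c t ih =>
    simp only [List.foldl_cons, List.map_cons]
    by_cases hc : c ∉ pyOpen
    · rw [if_pos hc, ih]
      simp [hc]
    · rw [if_neg hc, ih]
      simp [hc]

theorem nodup_two (S : List String) (hnd : S.Nodup) (hmem : ∀ a ∈ S, a = "x" ∨ a = "y") :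
    (S.length = 2 ↔ "x" ∈ S ∧ "y" ∈ S) := by
  match S with
  | [] => simp
  | [a] => rcases hmem a (by simp) with rfl | rfl <;> simp
  | [a, b] =>
    rcases hmem a (by simp) with rfl | rfl <;> rcases hmem b (by simp) with rfl | rfl <;>
      simp_all
  | a :: b :: c :: t =>
    exfalso
    simp [List.nodup_cons] at hnd
    rcases hmem a (by simp) with rfl | rfl <;> rcases hmem b (by simp) with rfl | rfl <;>
      rcases hmem c (by simp) with rfl | rfl <;> simp_all

-- classification: the two-tag set has size 2 iff both classes occur
theorem two_tags (L : List String) (hL : ∀ a ∈ L, a = "x" ∨ a = "y") :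
    (PySem.Set.len (PySem.Set.ofList L) = 2 ↔ "x" ∈ L ∧ "y" ∈ L) := by
  have hnd := PySem.Set.nodup_ofList (xs := L)
  have hm : ∀ a, a ∈ PySem.Set.ofList L ↔ a ∈ L := fun a => PySem.Set.mem_ofList L a
  have hlen : PySem.Set.len (PySem.Set.ofList L) = 2 ↔ (PySem.Set.ofList L).length = 2 := by
    rw [show PySem.Set.len (PySem.Set.ofList L) = ((PySem.Set.ofList L).length : Int) from rfl]
    exact_mod_cast Iff.rfl
  rw [hlen, nodup_two _ hnd (fun a ha => hL a ((hm a).mp ha)), hm, hm]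

theorem openB_eq : openB = pyOpen := by decide

-- ===== VERDICT (by name: the statement is the Claim_ definition above) =====
theorem check_incomplete_spec : Claim_equal_check_incomplete := by
  intro line _
  unfold Spec_check_incomplete check_incomplete check_incomplete_alt
  rw [stack_eq_residual line, openB_eq]
  set r := (rekursionA line).toList with hr
  rw [checker_map r []]
  simp only [List.nil_append]
  have htags : ∀ a ∈ r.map (fun x => if x ∉ pyOpen then "x" else "y"), a = "x" ∨ a = "y" := by
    intro a ha
    simp only [List.mem_map] at ha
    obtain ⟨c, _, hc⟩ := ha
    by_cases h : c ∉ pyOpen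
    · left; rw [← hc, if_pos h]
    · right; rw [← hc, if_neg h]
  have hx : ("x" ∈ r.map (fun x => if x ∉ pyOpen then "x" else "y")) ↔
      (r.any fun c => decide (c ∉ pyOpen)) = true := by
    simp only [List.mem_map, List.any_eq_true, decide_eq_true_eq]
    constructor
    · rintro ⟨c, hc, he⟩
      refine ⟨c, hc, ?_⟩
      by_cases h : c ∉ pyOpen
      · exact h
      · rw [if_neg h] at he; exact absurd he (by decide)
    · rintro ⟨c, hc, h⟩
      exact ⟨c, ⟨hc, if_pos h⟩⟩
  have hy : ("y" ∈ r.map (fun x => if x ∉ pyOpen then "x" else "y")) ↔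
      (r.any fun c => decide (c ∈ pyOpen)) = true := by
    simp only [List.mem_map, List.any_eq_true, decide_eq_true_eq]
    constructor
    · rintro ⟨c, hc, he⟩
      refine ⟨c, hc, ?_⟩
      by_cases h : c ∉ pyOpen
      · rw [if_pos h] at he; exact absurd he (by decide)
      · exact not_not.mp h
    · rintro ⟨c, hc, h⟩
      exact ⟨c, ⟨hc, if_neg (not_not.mpr h)⟩⟩
  have hiff := two_tags _ htags
  rw [hx, hy] at hiff
  refine if_congr ?_ rfl rfl
  rw [hiff, Bool.and_eq_true]
  tauto
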